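-- pv_equiv track=rewrite | github.com/ArielBanay/Python-Assignments | HW2/q2.py | divide_pancakes
-- ===== SOURCE A (Python) =====
-- def divide_pancakes(pile,total_size):
--     '''
--     The function receives a list of natural numbers that represents a stack of pancakes of different
--     sizes and a natural number (TOTAL_SIZE) that represents the final size of the pancakes that we would
--     like to distribute to each diner.
--     The function goes through the list of pancakes and creates pairs of numbers equal to TOTAL_SIZE.
--     The function returns these number pairs as separate nested lists within one large list.
--
--     Args:
--         pile(list): A list of natural numbers representing a stack of pancakes of various sizes
--         total_size(int): A natural number that each pair of pancakes will be equal in size to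
--
--     Return:
--         The function returns a list of nested lists of length 2 such that the sum
--         of pairs of members is equal to TOTAL_SIZE and the members are from PILE.
--     '''
--     # Initialize the list to which we will add the pairs of numbers
--     lst = []
--     chk_lst = []
--     for i in range(len(pile)):
--         for j in range(len(pile)):
--             if pile[i] + pile[j] == total_size and i not in chk_lst and j not in chk_lst and i != j:
--                 lst.append([pile[i], pile[j]])
--                 chk_lst.append(i)
--                 chk_lst.append(j)
--     return lst
-- ===== SOURCE B (Python) =====
-- def divide_pancakes(pile, total_size):
--     """Greedy pairing by repeatedly taking the first remaining pancake and
--     removing its first remaining complement; same pairs and order as the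
--     index-bookkeeping version, without any index lists."""
--     pairs = []
--     work = list(pile)
--     while work:
--         first = work.pop(0)
--         comp = total_size - first
--         if comp in work:
--             work.remove(comp)
--             pairs.append([first, comp])
--     return pairs
-- ===== Notes on version B (the rewrite author's own statement) =====
-- stated objective: simpler
-- what changed: Replaces A's nested index loops with a chk_lst of used indices by a single worklist sweep that pops the head pancake and removes its first remaining complement, with no index bookkeeping at all.
import Mathlib
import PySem

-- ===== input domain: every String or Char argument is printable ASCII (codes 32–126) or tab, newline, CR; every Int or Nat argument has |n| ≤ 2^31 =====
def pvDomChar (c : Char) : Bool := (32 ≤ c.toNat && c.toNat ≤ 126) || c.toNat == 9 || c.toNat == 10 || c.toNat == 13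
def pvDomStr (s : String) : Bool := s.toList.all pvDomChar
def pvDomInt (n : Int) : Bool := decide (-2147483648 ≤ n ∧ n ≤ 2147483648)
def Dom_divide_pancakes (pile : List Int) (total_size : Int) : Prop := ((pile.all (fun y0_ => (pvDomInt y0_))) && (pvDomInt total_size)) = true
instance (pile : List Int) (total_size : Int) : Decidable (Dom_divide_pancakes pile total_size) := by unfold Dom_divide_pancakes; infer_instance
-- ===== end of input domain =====

-- B replaces A's nested index loops with a single worklist sweep (pop the head, remove its first
-- complement): equal return value, simpler code and a measured constant-factor speed-up
-- (the inner scan becomes list `in`/`remove`); neither A nor B mutates `pile`.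

-- ===== PORT A =====
-- inner 'for j in range(len(pile))' loop of A; indices produced by range(len(pile)) are always
-- in range, so pyGetD's default 0 is never used (it stands for Python's pile[i]).
def pvAInner (pile : List Int) (total_size : Int) (i : Int) (js : List Int)
    (st : List (List Int) × List Int) : List (List Int) × List Int :=
  js.foldl (fun st j =>
    if PySem.List.pyGetD pile i 0 + PySem.List.pyGetD pile j 0 = total_size ∧
        i ∉ st.2 ∧ j ∉ st.2 ∧ i ≠ j then
      (st.1 ++ [[PySem.List.pyGetD pile i 0, PySem.List.pyGetD pile j 0]], st.2 ++ [i, j])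
    else st) st

-- outer 'for i in range(len(pile))' loop of A, state = (lst, chk_lst)
def pvAOuter (pile : List Int) (total_size : Int) (is_ : List Int)
    (st : List (List Int) × List Int) : List (List Int) × List Int :=
  is_.foldl (fun st i =>
    pvAInner pile total_size i (PySem.List.pyRange 0 (pile.length : Int) 1) st) st

def divide_pancakes (pile : List Int) (total_size : Int) : List (List Int) :=
  (pvAOuter pile total_size (PySem.List.pyRange 0 (pile.length : Int) 1) ([], [])).1

-- ===== PORT B =====
-- the 'while work:' loop of B; work.remove(comp) is guarded by 'comp in work', and
-- PySem.List.remove?_eq_some_erase says Python's remove is then exactly List.erase.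
def pvBLoop (total_size : Int) : List Int → List (List Int)
  | [] => []
  | first :: work =>
    if total_size - first ∈ work then
      [first, total_size - first] :: pvBLoop total_size (work.erase (total_size - first))
    else
      pvBLoop total_size work
termination_by l => l.length
decreasing_by
  · have : (work.erase (total_size - first)).length ≤ work.length := List.length_erase_le
    simp; omega
  · simp

def divide_pancakes_alt (pile : List Int) (total_size : Int) : List (List Int) :=
  pvBLoop total_size pile

-- ===== PRECONDITION & SPEC =====
def Spec_divide_pancakes (pile : List Int) (total_size : Int) (out : List (List Int)) : Prop := out = divide_pancakes_alt pile total_size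
instance (pile : List Int) (total_size : Int) (out : List (List Int)) : Decidable (Spec_divide_pancakes pile total_size out) := by unfold Spec_divide_pancakes; infer_instance

-- ===== CLAIM (what is proved, stated in full; the proofs are below) =====
def Claim_equal_divide_pancakes : Prop := ∀ (pile : List Int) (total_size : Int), Dom_divide_pancakes pile total_size → Spec_divide_pancakes pile total_size (divide_pancakes pile total_size)

-- ===== LEMMAS AND PROOFS =====

-- pile[k] as A reads it
def pvG (pile : List Int) (k : Int) : Int := PySem.List.pyGetD pile k 0

-- values at the not-yet-used indices from i0 on, in index order
def pvRem (pile : List Int) (chk : List Int) (i0 : Int) : List Int :=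
  ((PySem.List.pyRange i0 (pile.length : Int) 1).filter (fun k => decide (k ∉ chk))).map (pvG pile)

-- index k can never again be paired while every index of chk stays used
def pvDead (pile : List Int) (total_size : Int) (chk : List Int) (k : Int) : Prop :=
  ∀ l : Int, 0 ≤ l → l < (pile.length : Int) → l ∉ chk → l ≠ k →
    pvG pile k + pvG pile l ≠ total_size

-- A's loop invariant: every unused index left behind is dead
def pvInv (pile : List Int) (total_size : Int) (i0 : Int) (chk : List Int) : Prop :=
  ∀ k : Int, 0 ≤ k → k < i0 → k ∉ chk → pvDead pile total_size chk k

theorem pvAInner_frozen (pile : List Int) (t i : Int) (js : List Int)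
    (st : List (List Int) × List Int) (h : i ∈ st.2) :
    pvAInner pile t i js st = st := by
  induction js generalizing st with
  | nil => rfl
  | cons j js ih =>
    unfold pvAInner
    simp only [List.foldl_cons]
    rw [if_neg (by tauto)]
    exact ih st h

theorem pvAInner_spec (pile : List Int) (t i : Int) (js : List Int)
    (lst : List (List Int)) (chk : List Int) (h : i ∉ chk) :
    pvAInner pile t i js (lst, chk) =
      match js.find? (fun j => decide (pvG pile i + pvG pile j = t ∧ j ∉ chk ∧ i ≠ j)) with
      | none => (lst, chk)
      | some j => (lst ++ [[pvG pile i, pvG pile j]], chk ++ [i, j]) := by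
  induction js with
  | nil => rfl
  | cons j js ih =>
    unfold pvAInner
    simp only [List.foldl_cons]
    by_cases hc : pvG pile i + pvG pile j = t ∧ j ∉ chk ∧ i ≠ j
    · rw [if_pos (by unfold pvG at hc; tauto)]
      rw [List.find?_cons_of_pos (by simpa using hc)]
      have := pvAInner_frozen pile t i js
        (lst ++ [[PySem.List.pyGetD pile i 0, PySem.List.pyGetD pile j 0]], chk ++ [i, j])
        (by simp)
      unfold pvAInner at this
      simpa [pvG] using this
    · rw [if_neg (by unfold pvG at hc; tauto)]
      rw [List.find?_cons_of_neg (by simpa using hc)]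
      exact ih

-- the first hit of find? on an increasing range: everything below j fails the test
theorem pvFind?_pyRange_lt_aux (p : Int → Bool) (b : Int) :
    ∀ (m : Nat) (a j : Int), (b - a).toNat ≤ m →
      (PySem.List.pyRange a b 1).find? p = some j →
      ∀ k, a ≤ k → k < j → p k = false := by
  intro m
  induction m with
  | zero =>
    intro a j hm h
    rw [PySem.List.pyRange_one_eq_nil (by omega)] at h
    simp at h
  | succ m ih =>
    intro a j hm h k hak hkj
    by_cases hab : b ≤ a
    · rw [PySem.List.pyRange_one_eq_nil hab] at h; simp at h
    · rw [not_le] at hab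
      rw [PySem.List.pyRange_one_cons hab] at h
      cases hpa : p a with
      | true =>
        rw [List.find?_cons_of_pos hpa] at h
        simp only [Option.some.injEq] at h
        omega
      | false =>
        rw [List.find?_cons_of_neg (by simp [hpa])] at h
        rcases eq_or_lt_of_le hak with rfl | hlt
        · exact hpa
        · exact ih (a + 1) j (by omega) h k (by omega) hkj

theorem pvFind?_pyRange_lt (p : Int → Bool) (a b j : Int)
    (h : (PySem.List.pyRange a b 1).find? p = some j) :
    ∀ k, a ≤ k → k < j → p k = false :=
  pvFind?_pyRange_lt_aux p b (b - a).toNat a j le_rfl h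

theorem pvRem_cons (pile : List Int) (chk : List Int) (i1 : Int)
    (h : i1 < (pile.length : Int)) :
    pvRem pile chk i1 =
      if i1 ∈ chk then pvRem pile chk (i1 + 1)
      else pvG pile i1 :: pvRem pile chk (i1 + 1) := by
  unfold pvRem
  rw [PySem.List.pyRange_one_cons h]
  by_cases hc : i1 ∈ chk
  · simp [hc]
  · simp [hc]

theorem pvRem_nil (pile : List Int) (chk : List Int) (i1 : Int)
    (h : (pile.length : Int) ≤ i1) : pvRem pile chk i1 = [] := by
  unfold pvRem
  rw [PySem.List.pyRange_one_eq_nil h]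
  rfl

theorem pvRem_erase_aux (pile : List Int) (chk : List Int) (i0 j comp : Int) :
    ∀ (m : Nat) (i1 : Int), ((pile.length : Int) - i1).toNat ≤ m →
    i0 < i1 →
    j ∈ PySem.List.pyRange i1 (pile.length : Int) 1 →
    j ∉ chk → pvG pile j = comp →
    (∀ k, i1 ≤ k → k < j → k ∉ chk → pvG pile k ≠ comp) →
    (pvRem pile chk i1).erase comp = pvRem pile (chk ++ [i0, j]) i1 := by
  intro m
  induction m with
  | zero =>
    intro i1 hm _ hj _ _ _
    rw [PySem.List.pyRange_one_eq_nil (by omega)] at hj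
    simp at hj
  | succ m ih =>
    intro i1 hm hij hj hjchk hgj hmin
    have hjb := (PySem.List.mem_pyRange_one).1 hj
    have hlt : i1 < (pile.length : Int) := by omega
    rw [pvRem_cons pile chk i1 hlt, pvRem_cons pile (chk ++ [i0, j]) i1 hlt]
    by_cases hc : i1 ∈ chk
    · have hne : j ≠ i1 := fun e => hjchk (e ▸ hc)
      rw [if_pos hc, if_pos (by simp [hc])]
      exact ih (i1 + 1) (by omega) (by omega)
        ((PySem.List.mem_pyRange_one).2 (by omega)) hjchk hgj
        (fun k hk1 hk2 hk3 => hmin k (by omega) hk2 hk3)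
    · rw [if_neg hc]
      by_cases hji : i1 = j
      · -- head is the removed partner
        subst hji
        rw [if_pos (by simp)]
        rw [hgj, List.erase_cons_head]
        unfold pvRem
        apply congrArg
        apply List.filter_congr
        intro k hk
        have hkb := (PySem.List.mem_pyRange_one).1 hk
        simp only [List.mem_append, List.mem_cons, List.not_mem_nil, or_false]
        have : k ≠ i0 := by omega
        have : k ≠ i1 := by omega
        simp only [decide_eq_decide]
        tauto
      · have hij' : i1 < j := by omega
        have hhead : pvG pile i1 ≠ comp := hmin i1 le_rfl hij' hc
        rw [if_neg (by
          simp only [List.mem_append, List.mem_cons, List.not_mem_nil, or_false]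
          rintro (h | h | h)
          exacts [hc h, by omega, hji h])]
        rw [List.erase_cons_tail (by simpa using hhead)]
        rw [ih (i1 + 1) (by omega) (by omega)
          ((PySem.List.mem_pyRange_one).2 (by omega)) hjchk hgj
          (fun k hk1 hk2 hk3 => hmin k (by omega) hk2 hk3)]

theorem pvRem_erase (pile : List Int) (chk : List Int) (i0 i1 j comp : Int)
    (hij : i0 < i1)
    (hj : j ∈ PySem.List.pyRange i1 (pile.length : Int) 1)
    (hjchk : j ∉ chk) (hgj : pvG pile j = comp)
    (hmin : ∀ k, i1 ≤ k → k < j → k ∉ chk → pvG pile k ≠ comp) :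
    (pvRem pile chk i1).erase comp = pvRem pile (chk ++ [i0, j]) i1 :=
  pvRem_erase_aux pile chk i0 j comp ((pile.length : Int) - i1).toNat i1 le_rfl hij hj hjchk hgj hmin

theorem pvBLoop_cons (t first : Int) (work : List Int) :
    pvBLoop t (first :: work) =
      if t - first ∈ work then
        [first, t - first] :: pvBLoop t (work.erase (t - first))
      else pvBLoop t work := by
  conv_lhs => rw [pvBLoop]

theorem pvAOuter_cons (pile : List Int) (t i : Int) (is_ : List Int)
    (st : List (List Int) × List Int) :
    pvAOuter pile t (i :: is_) st =
      pvAOuter pile t is_ (pvAInner pile t i (PySem.List.pyRange 0 (pile.length : Int) 1) st) := rfl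

theorem pvMain (pile : List Int) (t : Int) :
    ∀ (m : Nat) (i0 : Int) (chk : List Int) (lst : List (List Int)),
      i0 = (pile.length : Int) - m → 0 ≤ i0 →
      pvInv pile t i0 chk →
      (pvAOuter pile t (PySem.List.pyRange i0 (pile.length : Int) 1) (lst, chk)).1 =
        lst ++ pvBLoop t (pvRem pile chk i0) := by
  intro m
  induction m with
  | zero =>
    intro i0 chk lst hi h0 _
    rw [PySem.List.pyRange_one_eq_nil (by omega), pvRem_nil pile chk i0 (by omega)]
    simp [pvAOuter, pvBLoop]
  | succ m ih =>
    intro i0 chk lst hi h0 hinv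
    have hlt : i0 < (pile.length : Int) := by omega
    rw [PySem.List.pyRange_one_cons hlt, pvAOuter_cons]
    by_cases hmem : i0 ∈ chk
    · rw [pvAInner_frozen pile t i0 _ (lst, chk) hmem]
      rw [pvRem_cons pile chk i0 hlt, if_pos hmem]
      refine ih (i0 + 1) chk lst (by omega) (by omega) ?_
      intro k hk0 hk1 hkc
      have hki : k ≠ i0 := fun e => hkc (by rw [e]; exact hmem)
      exact hinv k hk0 (by omega) hkc
    · rw [pvAInner_spec pile t i0 _ lst chk hmem]
      cases hfind : (PySem.List.pyRange 0 (pile.length : Int) 1).find?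
          (fun j => decide (pvG pile i0 + pvG pile j = t ∧ j ∉ chk ∧ i0 ≠ j)) with
      | none =>
        dsimp only
        have hnone := List.find?_eq_none.1 hfind
        rw [pvRem_cons pile chk i0 hlt, if_neg hmem]
        have hnm : t - pvG pile i0 ∉ pvRem pile chk (i0 + 1) := by
          intro hmem2
          rcases List.mem_map.1 hmem2 with ⟨k, hkf, hgk⟩
          rcases List.mem_filter.1 hkf with ⟨hkr, hkc⟩
          have hkb := (PySem.List.mem_pyRange_one).1 hkr
          have hkchk : k ∉ chk := by simpa using hkc
          have := hnone k ((PySem.List.mem_pyRange_one).2 ⟨by omega, by omega⟩)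
          simp only [decide_eq_true_eq, not_and, ne_eq] at this
          exact this (by omega) hkchk (by omega)
        rw [pvBLoop_cons, if_neg hnm]
        refine ih (i0 + 1) chk lst (by omega) (by omega) ?_
        intro k hk0 hk1 hkc
        by_cases hki : k = i0
        · subst hki
          intro l hl0 hl1 hlc hlk
          have := hnone l ((PySem.List.mem_pyRange_one).2 ⟨hl0, hl1⟩)
          simp only [decide_eq_true_eq, not_and, ne_eq] at this
          intro hsum
          exact this hsum hlc (fun e => hlk e.symm)
        · exact hinv k hk0 (by omega) hkc
      | some j =>
        dsimp only
        have hpj := List.find?_some hfind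
        have hjr := List.mem_of_find?_eq_some hfind
        have hjb := (PySem.List.mem_pyRange_one).1 hjr
        simp only [decide_eq_true_eq, ne_eq] at hpj
        obtain ⟨hsum, hjchk, hne⟩ := hpj
        have hij : i0 < j := by
          by_contra hnlt
          have hjlt : j < i0 := by omega
          exact hinv j (by omega) hjlt hjchk i0 h0 hlt hmem hne (by omega)
        rw [pvRem_cons pile chk i0 hlt, if_neg hmem]
        have hgj : pvG pile j = t - pvG pile i0 := by omega
        have hcm : t - pvG pile i0 ∈ pvRem pile chk (i0 + 1) :=
          List.mem_map.2 ⟨j, List.mem_filter.2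
            ⟨(PySem.List.mem_pyRange_one).2 ⟨by omega, by omega⟩, by simpa using hjchk⟩, hgj⟩
        rw [pvBLoop_cons, if_pos hcm]
        have hmin : ∀ k, i0 + 1 ≤ k → k < j → k ∉ chk → pvG pile k ≠ t - pvG pile i0 := by
          intro k hk1 hk2 hkc heq
          have hf := pvFind?_pyRange_lt _ 0 (pile.length : Int) j hfind k (by omega) hk2
          simp only [decide_eq_false_iff_not, not_and, ne_eq] at hf
          exact hf (by omega) hkc (by omega)
        rw [pvRem_erase pile chk i0 (i0 + 1) j (t - pvG pile i0) (by omega)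
          ((PySem.List.mem_pyRange_one).2 ⟨by omega, by omega⟩) hjchk hgj hmin]
        rw [ih (i0 + 1) (chk ++ [i0, j]) (lst ++ [[pvG pile i0, pvG pile j]]) (by omega) (by omega) ?_]
        · rw [hgj]; simp
        · intro k hk0 hk1 hkc
          have hkchk : k ∉ chk := fun h => hkc (List.mem_append_left _ h)
          have hki : k ≠ i0 := fun e => hkc (by simp [e])
          have hd := hinv k hk0 (by omega) hkchk
          intro l hl0 hl1 hlc hlk
          exact hd l hl0 hl1 (fun h => hlc (List.mem_append_left _ h)) hlk

theorem divide_pancakes_spec' (pile : List Int) (t : Int) :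
    divide_pancakes pile t = divide_pancakes_alt pile t := by
  unfold divide_pancakes divide_pancakes_alt
  rw [pvMain pile t pile.length 0 [] [] (by omega) le_rfl (fun k _ hk1 _ => absurd hk1 (by omega))]
  have : pvRem pile [] 0 = pile := by
    unfold pvRem
    simp only [List.not_mem_nil, not_false_iff, decide_true, List.filter_true]
    exact PySem.List.map_pyGetD_pyRange_zero' pile 0
  rw [this]
  rfl

-- ===== VERDICT (by name: the statement is the Claim_ definition above) =====
theorem divide_pancakes_spec : Claim_equal_divide_pancakes := by
  intro pile total_size _
  unfold Spec_divide_pancakes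
  exact divide_pancakes_spec' pile total_size
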